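-- pv_equiv track=rewrite | github.com/jjabakker/BioPractice | CombineStrings.py | str_overlap_work
-- ===== SOURCE A (Python) =====
-- def str_overlap_work(str1, str2, min_overlap):
--     n = len(str1)
--     nmax = 0
--     smax = ''
--
--     for i in range(n - 1, -1, -1):
--
--         s1 = str1[i:]
--         s2 = str2
--
--         n = min(len(s1), len(s2))
--         if n >= min_overlap:
--             if s1[:n] == str2[:n]:
--                 s3 = str1 + str2[n:]
--                 if n > nmax:
--                     smax = s3
--                     nmax = n
--
--     return nmax, smax
-- ===== SOURCE B (Python) =====
-- def str_overlap_work(str1, str2, min_overlap):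
--     # The best overlap A records is the one at the SMALLEST aligning position i
--     # (overlap length min(len1-i, len2) only shrinks as i grows), so find that
--     # position directly: first a fast full-substring search, then a single
--     # ascending scan over the short suffix region with early exit.
--     n1, n2 = len(str1), len(str2)
--     if n1 == 0 or n2 == 0:
--         return 0, ''
--     i = str1.find(str2)
--     if i < 0:
--         for i in range(max(n1 - n2 + 1, 0), n1):
--             if str2.startswith(str1[i:]):
--                 break
--         else:
--             return 0, ''
--     k = min(n1 - i, n2)
--     if k >= min_overlap:
--         return k, str1 + str2[k:]
--     return 0, ''
-- ===== Notes on version B (the rewrite author's own statement) =====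
-- stated objective: alternative
-- what changed: A scans every alignment i of str1 top-down, comparing slices at each; B locates the single winning alignment directly (the best overlap is the one at the smallest aligning position): one str.find substring search, then one early-exit ascending scan of the suffix region.
import Mathlib
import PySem

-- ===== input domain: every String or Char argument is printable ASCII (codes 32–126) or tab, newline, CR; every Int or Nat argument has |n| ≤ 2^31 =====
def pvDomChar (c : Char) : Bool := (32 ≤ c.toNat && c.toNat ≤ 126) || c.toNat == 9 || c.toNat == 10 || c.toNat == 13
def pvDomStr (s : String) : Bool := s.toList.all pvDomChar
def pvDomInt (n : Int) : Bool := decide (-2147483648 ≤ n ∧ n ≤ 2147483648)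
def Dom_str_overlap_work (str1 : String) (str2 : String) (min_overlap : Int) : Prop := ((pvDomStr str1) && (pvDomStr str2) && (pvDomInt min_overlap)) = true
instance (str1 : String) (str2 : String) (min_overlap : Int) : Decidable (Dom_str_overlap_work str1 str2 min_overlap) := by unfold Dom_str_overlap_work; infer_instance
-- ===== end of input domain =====

-- B replaces A's full descending scan over all alignments (each with a slice comparison)
-- by a direct search for the first aligning position: a substring find, then one
-- early-exit scan over the short suffix region.

-- ===== PORT A =====
def str_overlap_work (str1 : String) (str2 : String) (min_overlap : Int) : Int × String :=
  let n : Int := PySem.Str.len str1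
  let r := (PySem.List.pyRange (n - 1) (-1) (-1)).foldl
    (fun (st : Int × String) (i : Int) =>
      let s1 := PySem.Str.slice str1 (some i) none
      let s2 := str2
      let n' := min (PySem.Str.len s1) (PySem.Str.len s2)
      if n' ≥ min_overlap then
        if PySem.Str.slice s1 none (some n') = PySem.Str.slice str2 none (some n') then
          let s3 := str1 ++ PySem.Str.slice str2 (some n') none
          if n' > st.1 then (n', s3) else st
        else st
      else st) ((0 : Int), "")
  r

-- ===== PORT B =====
def str_overlap_work_alt (str1 : String) (str2 : String) (min_overlap : Int) : Int × String :=
  let n1 := PySem.Str.len str1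
  let n2 := PySem.Str.len str2
  if n1 = 0 ∨ n2 = 0 then ((0 : Int), "")
  else
    let i0 := PySem.Str.find str1 str2
    let iOpt : Option Int :=
      if i0 < 0 then
        -- Source B's for-loop with break/else: first i in the range passing the test
        (PySem.List.pyRange (max (n1 - n2 + 1) 0) n1 1).find?
          (fun i => PySem.Str.startswith str2 (PySem.Str.slice str1 (some i) none))
      else some i0
    match iOpt with
    | none => ((0 : Int), "")
    | some i =>
      let k := min (n1 - i) n2
      if k ≥ min_overlap then (k, str1 ++ PySem.Str.slice str2 (some k) none)
      else ((0 : Int), "")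

-- ===== PRECONDITION & SPEC =====
def Spec_str_overlap_work (str1 : String) (str2 : String) (min_overlap : Int) (out : Int × String) : Prop := out = str_overlap_work_alt str1 str2 min_overlap
instance (str1 : String) (str2 : String) (min_overlap : Int) (out : Int × String) : Decidable (Spec_str_overlap_work str1 str2 min_overlap out) := by unfold Spec_str_overlap_work; infer_instance

-- ===== CLAIM (what is proved, stated in full; the proofs are below) =====
def Claim_equal_str_overlap_work : Prop := ∀ (str1 : String) (str2 : String) (min_overlap : Int), Dom_str_overlap_work str1 str2 min_overlap → Spec_str_overlap_work str1 str2 min_overlap (str_overlap_work str1 str2 min_overlap)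


-- ===== LEMMAS AND PROOFS =====

-- A's loop body as a named function (definitionally equal to the lambda in the port)
def pvStepA (str1 str2 : String) (min_overlap : Int) (st : Int × String) (i : Int) : Int × String :=
  let s1 := PySem.Str.slice str1 (some i) none
  let s2 := str2
  let n' := min (PySem.Str.len s1) (PySem.Str.len s2)
  if n' ≥ min_overlap then
    if PySem.Str.slice s1 none (some n') = PySem.Str.slice str2 none (some n') then
      let s3 := str1 ++ PySem.Str.slice str2 (some n') none
      if n' > st.1 then (n', s3) else st
    else st
  else st

-- the candidate value A's body would record at alignment i (0 when disqualified)
def pvQ (str1 str2 : String) (m : Int) (i : Int) : Int :=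
  let n' := min (PySem.Str.len (PySem.Str.slice str1 (some i) none)) (PySem.Str.len str2)
  if n' ≥ m ∧ PySem.Str.slice (PySem.Str.slice str1 (some i) none) none (some n') = PySem.Str.slice str2 none (some n') then n' else 0

-- A's state is determined by its first component
def pvPack (str1 str2 : String) (M : Int) : Int × String :=
  if M = 0 then ((0 : Int), "") else (M, str1 ++ PySem.Str.slice str2 (some M) none)

-- overlap length at alignment i, and the matching condition, on the list side
def pvK (l1 l2 : List Char) (i : Int) : Int := min ((l1.length : Int) - i) (l2.length : Int)

def pvMatch (l1 l2 : List Char) (i : Int) : Bool :=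
  (l1.drop i.toNat).take (pvK l1 l2 i).toNat == l2.take (pvK l1 l2 i).toNat

lemma pvQ_nonneg (str1 str2 : String) (m i : Int) : 0 ≤ pvQ str1 str2 m i := by
  unfold pvQ
  simp only []
  split
  · have h1 : (0 : Int) ≤ PySem.Str.len (PySem.Str.slice str1 (some i) none) := by simp
    have h2 : (0 : Int) ≤ PySem.Str.len str2 := by simp
    exact le_min h1 h2
  · exact le_refl 0

lemma pvPack_fst (str1 str2 : String) (M : Int) : (pvPack str1 str2 M).1 = M := by
  unfold pvPack; split <;> simp_all

lemma pvStepA_pack (str1 str2 : String) (m M i : Int) (hM : 0 ≤ M) :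
    pvStepA str1 str2 m (pvPack str1 str2 M) i = pvPack str1 str2 (max M (pvQ str1 str2 m i)) := by
  have hQ := pvQ_nonneg str1 str2 m i
  unfold pvStepA pvQ
  simp only [pvPack_fst]
  set n' := min (PySem.Str.len (PySem.Str.slice str1 (some i) none)) (PySem.Str.len str2) with hn
  have hn0 : (0:Int) ≤ n' := le_min (by simp) (by simp)
  by_cases hc : n' ≥ m ∧ PySem.Str.slice (PySem.Str.slice str1 (some i) none) none (some n')
      = PySem.Str.slice str2 none (some n')
  · rw [if_pos hc, if_pos hc.1, if_pos hc.2]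
    by_cases h3 : n' > M
    · rw [if_pos h3, max_eq_right (by omega)]
      unfold pvPack
      rw [if_neg (by omega)]
    · rw [if_neg h3, max_eq_left (by omega)]
  · rw [if_neg hc, max_eq_left (by omega)]
    by_cases h1 : n' ≥ m
    · rw [if_pos h1, if_neg (fun h2 => hc ⟨h1, h2⟩)]
    · rw [if_neg h1]

lemma pvFoldA (str1 str2 : String) (m : Int) (is : List Int) : ∀ (M : Int), 0 ≤ M →
    is.foldl (pvStepA str1 str2 m) (pvPack str1 str2 M)
      = pvPack str1 str2 (is.foldl (fun acc i => max acc (pvQ str1 str2 m i)) M) := by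
  induction is with
  | nil => intro M h; rfl
  | cons x t ih =>
      intro M hM
      simp only [List.foldl_cons, pvStepA_pack str1 str2 m M x hM]
      exact ih _ (le_trans hM (le_max_left _ _))

def pvMA (str1 str2 : String) (m : Int) : Int :=
  (PySem.List.pyRange (PySem.Str.len str1 - 1) (-1) (-1)).foldl (fun acc i => max acc (pvQ str1 str2 m i)) 0

lemma pvA_eq (str1 str2 : String) (m : Int) :
    str_overlap_work str1 str2 m = pvPack str1 str2 (pvMA str1 str2 m) := by
  show (PySem.List.pyRange (PySem.Str.len str1 - 1) (-1) (-1)).foldl (pvStepA str1 str2 m) ((0 : Int), "") = _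
  rw [show ((0 : Int), "") = pvPack str1 str2 0 from rfl]
  exact pvFoldA str1 str2 m _ 0 le_rfl

lemma pvFoldlMax_mem (f : Int → Int) (l : List Int) : ∀ (a : Int),
    l.foldl (fun acc i => max acc (f i)) a = a ∨ ∃ i ∈ l, l.foldl (fun acc i => max acc (f i)) a = f i := by
  induction l with
  | nil => intro a; left; rfl
  | cons x t ih =>
      intro a
      simp only [List.foldl_cons]
      rcases ih (max a (f x)) with h | ⟨i, hi, h⟩
      · rcases max_choice a (f x) with h' | h'
        · left; rw [h, h']
        · right; exact ⟨x, List.mem_cons_self, by rw [h, h']⟩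
      · right; exact ⟨i, List.mem_cons_of_mem _ hi, h⟩

lemma pvQ_eq (str1 str2 : String) (m i : Int) (h0 : 0 ≤ i) (hi : i ≤ (str1.toList.length : Int)) :
    pvQ str1 str2 m i =
      if pvK str1.toList str2.toList i ≥ m ∧ pvMatch str1.toList str2.toList i = true
      then pvK str1.toList str2.toList i else 0 := by
  have hs1 : (PySem.Str.slice str1 (some i) none).toList = str1.toList.drop i.toNat := by
    simp [PySem.List.slice_from _ h0]
  have hK0 : 0 ≤ pvK str1.toList str2.toList i := le_min (by omega) (by positivity)
  have hlen : min (PySem.Str.len (PySem.Str.slice str1 (some i) none)) (PySem.Str.len str2)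
      = pvK str1.toList str2.toList i := by
    simp [hs1, pvK, -String.length_toList]
    omega
  have hcond : (PySem.Str.slice (PySem.Str.slice str1 (some i) none) none (some (pvK str1.toList str2.toList i))
        = PySem.Str.slice str2 none (some (pvK str1.toList str2.toList i)))
      ↔ pvMatch str1.toList str2.toList i = true := by
    rw [← String.toList_inj]
    simp [hs1, PySem.List.slice_to _ hK0, pvMatch]
  unfold pvQ
  simp only []
  rw [hlen]
  exact if_congr (and_congr Iff.rfl hcond) rfl rfl

-- a match at the smallest aligning index dominates every other candidate
lemma pvQ_le (str1 str2 : String) (m istar i : Int)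
    (h0 : 0 ≤ istar) (hle : istar ≤ i) (hi : i ≤ (str1.toList.length : Int))
    (hstar : pvMatch str1.toList str2.toList istar = true) :
    pvQ str1 str2 m i ≤ pvQ str1 str2 m istar := by
  rw [pvQ_eq str1 str2 m i (le_trans h0 hle) hi, pvQ_eq str1 str2 m istar h0 (le_trans hle hi)]
  have hKmono : pvK str1.toList str2.toList i ≤ pvK str1.toList str2.toList istar := by
    unfold pvK; omega
  have hK0 : 0 ≤ pvK str1.toList str2.toList istar := le_min (by omega) (by positivity)
  split_ifs with hA hB hB
  · exact hKmono
  · exact absurd ⟨by omega, hstar⟩ hB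
  · exact hK0
  · exact le_refl 0

lemma pvQ_eq_zero_of_not_match (str1 str2 : String) (m i : Int) (h0 : 0 ≤ i)
    (hi : i ≤ (str1.toList.length : Int)) (h : ¬ pvMatch str1.toList str2.toList i = true) :
    pvQ str1 str2 m i = 0 := by
  rw [pvQ_eq str1 str2 m i h0 hi]
  simp [h]

lemma pvMatch_full (l1 l2 : List Char) (i : Int) (_h0 : 0 ≤ i)
    (hN : i ≤ (l1.length : Int) - (l2.length : Int)) :
    pvMatch l1 l2 i = true ↔ l2 <+: l1.drop i.toNat := by
  have hk : (pvK l1 l2 i).toNat = l2.length := by unfold pvK; omega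
  simp only [pvMatch, beq_iff_eq, hk, List.take_length]
  rw [List.prefix_iff_eq_take]
  exact eq_comm

lemma pvMatch_suffix (l1 l2 : List Char) (i : Int) (h0 : 0 ≤ i)
    (hN : (l1.length : Int) - (l2.length : Int) < i) (h1 : i ≤ (l1.length : Int)) :
    pvMatch l1 l2 i = true ↔ l1.drop i.toNat <+: l2 := by
  have hk : (pvK l1 l2 i).toNat = (l1.drop i.toNat).length := by
    simp only [List.length_drop]
    unfold pvK
    omega
  simp only [pvMatch, beq_iff_eq, hk, List.take_length]
  rw [List.prefix_iff_eq_take]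

lemma pvPrefix_bound (l1 l2 : List Char) (j : Nat) (h : l2 <+: l1.drop j) :
    j + l2.length ≤ l1.length ∨ l2 = [] := by
  have hl := h.length_le
  simp only [List.length_drop] at hl
  rcases Nat.eq_zero_or_pos l2.length with h0 | h0
  · exact Or.inr (List.eq_nil_of_length_eq_zero h0)
  · exact Or.inl (by omega)

lemma pvFind?_pyRange_first (p : Int → Bool) (a b x : Int)
    (h : (PySem.List.pyRange a b 1).find? p = some x) :
    a ≤ x ∧ x < b ∧ p x = true ∧ ∀ y, a ≤ y → y < x → ¬ p y = true := by
  have hmem : x ∈ PySem.List.pyRange a b 1 := List.mem_of_find?_eq_some h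
  rw [PySem.List.mem_pyRange_one] at hmem
  refine ⟨hmem.1, hmem.2, List.find?_some h, ?_⟩
  intro y hay hyx hp
  rw [List.find?_eq_some_iff_append] at h
  obtain ⟨hpx, as, bs, hsplit, hfail⟩ := h
  have hpw := PySem.List.pairwise_lt_pyRange_one a b
  rw [hsplit] at hpw
  have hymem : y ∈ PySem.List.pyRange a b 1 := by
    rw [PySem.List.mem_pyRange_one]; exact ⟨hay, by omega⟩
  rw [hsplit, List.mem_append] at hymem
  rcases hymem with hy | hy
  · exact absurd hp (by simpa using hfail y hy)
  · rw [List.pairwise_append] at hpw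
    rcases List.mem_cons.mp hy with rfl | hy
    · omega
    · have := (List.pairwise_cons.mp hpw.2.1).1 y hy
      omega

-- ===== VERDICT (by name: the statement is the Claim_ definition above) =====
theorem str_overlap_work_spec : Claim_equal_str_overlap_work := by
  intro str1 str2 m _hdom
  unfold Spec_str_overlap_work
  rw [pvA_eq]
  unfold pvMA
  have hlen1 : PySem.Str.len str1 = (str1.toList.length : Int) := by simp
  have hlen2 : PySem.Str.len str2 = (str2.toList.length : Int) := by simp
  set R := PySem.List.pyRange (PySem.Str.len str1 - 1) (-1) (-1) with hR
  set MA := R.foldl (fun acc i => max acc (pvQ str1 str2 m i)) 0 with hMA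
  have hmemR : ∀ x : Int, x ∈ R ↔ 0 ≤ x ∧ x < (str1.toList.length : Int) := by
    intro x
    rw [hR, PySem.List.mem_pyRange_neg_one, hlen1]
    constructor <;> intro h <;> omega
  have hub := (PySem.List.le_foldl_max_int R (pvQ str1 str2 m) 0).2
  have hmem := pvFoldlMax_mem (pvQ str1 str2 m) R 0
  rw [← hMA] at hmem
  have hMA_zero : (∀ i ∈ R, pvQ str1 str2 m i = 0) → MA = 0 := by
    intro hall
    rcases hmem with h | ⟨i, hi, h⟩
    · exact h
    · rw [h]; exact hall i hi
  have hMA_min : ∀ istar : Int, 0 ≤ istar → istar < (str1.toList.length : Int) →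
      pvMatch str1.toList str2.toList istar = true →
      (∀ j : Int, 0 ≤ j → j < istar → ¬ pvMatch str1.toList str2.toList j = true) →
      MA = pvQ str1 str2 m istar := by
    intro istar h0 h1 hm hmin
    have hle : pvQ str1 str2 m istar ≤ MA := hub istar ((hmemR istar).mpr ⟨h0, h1⟩)
    have hge : MA ≤ pvQ str1 str2 m istar := by
      rcases hmem with h | ⟨i, hi, h⟩
      · rw [h]; exact pvQ_nonneg _ _ _ _
      · rw [h]
        rcases (hmemR i).mp hi with ⟨hi0, hi1⟩
        by_cases hcmp : istar ≤ i
        · exact pvQ_le str1 str2 m istar i h0 hcmp (by omega) hm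
        · rw [pvQ_eq_zero_of_not_match str1 str2 m i hi0 (by omega) (hmin i hi0 (by omega))]
          exact pvQ_nonneg _ _ _ _
    omega
  unfold str_overlap_work_alt
  simp only []
  by_cases hz : PySem.Str.len str1 = 0 ∨ PySem.Str.len str2 = 0
  · rw [if_pos hz]
    have hq : ∀ i ∈ R, pvQ str1 str2 m i = 0 := by
      intro i hi
      rcases (hmemR i).mp hi with ⟨h0, h1⟩
      rcases hz with hz' | hz'
      · rw [hlen1] at hz'; omega
      · rw [hlen2] at hz'
        rw [pvQ_eq str1 str2 m i h0 (by omega)]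
        have hk : pvK str1.toList str2.toList i = 0 := by unfold pvK; omega
        split_ifs <;> simp [hk]
    rw [hMA_zero hq]
    rfl
  · rw [if_neg hz]
    rw [not_or] at hz
    have hN1 : 0 < (str1.toList.length : Int) := by
      rcases Nat.eq_zero_or_pos str1.toList.length with h | h
      · exact absurd (by rw [hlen1, h]; rfl) hz.1
      · omega
    have hN2 : 0 < (str2.toList.length : Int) := by
      rcases Nat.eq_zero_or_pos str2.toList.length with h | h
      · exact absurd (by rw [hlen2, h]; rfl) hz.2
      · omega
    have hEnd : ∀ i : Int, 0 ≤ i → i < (str1.toList.length : Int) →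
        pvMatch str1.toList str2.toList i = true →
        (∀ j : Int, 0 ≤ j → j < i → ¬ pvMatch str1.toList str2.toList j = true) →
        pvPack str1 str2 MA =
          (if min (PySem.Str.len str1 - i) (PySem.Str.len str2) ≥ m
           then (min (PySem.Str.len str1 - i) (PySem.Str.len str2),
                 str1 ++ PySem.Str.slice str2 (some (min (PySem.Str.len str1 - i) (PySem.Str.len str2))) none)
           else ((0 : Int), "")) := by
      intro i h0 h1 hm hmin
      rw [hMA_min i h0 h1 hm hmin, pvQ_eq str1 str2 m i h0 (by omega), hlen1, hlen2]
      have hKe : min ((str1.toList.length : Int) - i) (str2.toList.length : Int)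
          = pvK str1.toList str2.toList i := rfl
      rw [hKe]
      simp only [hm, and_true]
      by_cases hk : pvK str1.toList str2.toList i ≥ m
      · rw [if_pos hk, if_pos hk]
        unfold pvPack
        rw [if_neg (by unfold pvK; omega)]
      · rw [if_neg hk, if_neg hk]
        rfl
    have heq : PySem.Str.find str1 str2 = PySem.Chars.find str1.toList str2.toList := by simp
    by_cases hneg : PySem.Str.find str1 str2 < 0
    · rw [if_pos hneg]
      have hfind : PySem.Chars.find str1.toList str2.toList = -1 := by
        have h2 := PySem.Chars.neg_one_le_find str1.toList str2.toList
        rw [heq] at hneg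
        omega
      have hnofull : ∀ j : Nat, ¬ str2.toList <+: str1.toList.drop j := by
        intro j hpre
        rw [PySem.Chars.find_eq_neg_one_iff] at hfind
        have hin := (PySem.Chars.exists_prefix_drop_iff_isIn str2.toList str1.toList).mp ⟨j, hpre⟩
        rw [PySem.Chars.isIn_iff_infix] at hin
        exact hfind hin
      have hsw : ∀ i : Int, 0 ≤ i →
          (PySem.Str.startswith str2 (PySem.Str.slice str1 (some i) none) = true
            ↔ str1.toList.drop i.toNat <+: str2.toList) := by
        intro i h0
        rw [PySem.Str.startswith_eq]
        have hs1 : (PySem.Str.slice str1 (some i) none).toList = str1.toList.drop i.toNat := by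
          simp [PySem.List.slice_from _ h0]
        rw [hs1, PySem.Chars.startswith_iff]
      cases hfq : (PySem.List.pyRange (max (PySem.Str.len str1 - PySem.Str.len str2 + 1) 0) (PySem.Str.len str1) 1).find?
          (fun i => PySem.Str.startswith str2 (PySem.Str.slice str1 (some i) none)) with
      | none =>
        have hnone := List.find?_eq_none.mp hfq
        have hq : ∀ i ∈ R, pvQ str1 str2 m i = 0 := by
          intro i hi
          rcases (hmemR i).mp hi with ⟨h0, h1⟩
          by_cases hreg : i ≤ (str1.toList.length : Int) - (str2.toList.length : Int)
          · refine pvQ_eq_zero_of_not_match str1 str2 m i h0 (by omega) ?_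
            rw [pvMatch_full str1.toList str2.toList i h0 hreg]
            exact hnofull i.toNat
          · refine pvQ_eq_zero_of_not_match str1 str2 m i h0 (by omega) ?_
            rw [pvMatch_suffix str1.toList str2.toList i h0 (by omega) (by omega)]
            have hmemRange : i ∈ PySem.List.pyRange (max (PySem.Str.len str1 - PySem.Str.len str2 + 1) 0) (PySem.Str.len str1) 1 := by
              rw [PySem.List.mem_pyRange_one, hlen1, hlen2]
              omega
            have hnp := hnone i hmemRange
            intro hpre
            exact hnp ((hsw i h0).mpr hpre)
        rw [hMA_zero hq]
        rfl
      | some i =>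
        obtain ⟨hlo, hiN, hpred, hbelow⟩ := pvFind?_pyRange_first _ _ _ _ hfq
        rw [hlen1, hlen2] at hlo
        rw [hlen1] at hiN
        have h0 : 0 ≤ i := by omega
        have hm : pvMatch str1.toList str2.toList i = true := by
          rw [pvMatch_suffix str1.toList str2.toList i h0 (by omega) (by omega)]
          exact (hsw i h0).mp hpred
        have hmin : ∀ j : Int, 0 ≤ j → j < i → ¬ pvMatch str1.toList str2.toList j = true := by
          intro j hj0 hji hmj
          by_cases hreg : j ≤ (str1.toList.length : Int) - (str2.toList.length : Int)
          · rw [pvMatch_full str1.toList str2.toList j hj0 hreg] at hmj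
            exact hnofull j.toNat hmj
          · have hjmem : max (PySem.Str.len str1 - PySem.Str.len str2 + 1) 0 ≤ j := by
              rw [hlen1, hlen2]; omega
            have := hbelow j hjmem hji
            rw [pvMatch_suffix str1.toList str2.toList j hj0 (by omega) (by omega)] at hmj
            exact this ((hsw j hj0).mpr hmj)
        exact hEnd i h0 (by omega) hm hmin
    · rw [if_neg hneg]
      simp only []
      rw [heq] at hneg
      have h0 : 0 ≤ PySem.Chars.find str1.toList str2.toList := by omega
      obtain ⟨hpre, hmin'⟩ := PySem.Chars.find_spec h0
      rw [heq]
      have hl2ne : str2.toList ≠ [] := by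
        intro hnil
        rw [hnil] at hN2
        simp at hN2
      have hb := pvPrefix_bound str1.toList str2.toList (PySem.Chars.find str1.toList str2.toList).toNat hpre
      rcases hb with hb | hb
      swap
      · exact absurd hb hl2ne
      have hFN : PySem.Chars.find str1.toList str2.toList ≤ (str1.toList.length : Int) - (str2.toList.length : Int) := by
        omega
      have hm : pvMatch str1.toList str2.toList (PySem.Chars.find str1.toList str2.toList) = true := by
        rw [pvMatch_full str1.toList str2.toList _ h0 hFN]
        exact hpre
      have hmin : ∀ j : Int, 0 ≤ j → j < PySem.Chars.find str1.toList str2.toList →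
          ¬ pvMatch str1.toList str2.toList j = true := by
        intro j hj0 hjF hmj
        by_cases hreg : j ≤ (str1.toList.length : Int) - (str2.toList.length : Int)
        · rw [pvMatch_full str1.toList str2.toList j hj0 hreg] at hmj
          exact hmin' j.toNat (by omega) hmj
        · omega
      exact hEnd _ h0 (by omega) hm hmin
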